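-- pv_equiv track=rewrite | github.com/dmitryakimov2206283/ITAM_python_course_2022 | homework/chapter-2/2_B.py | key_difference
-- ===== SOURCE A (Python) =====
-- def key_difference(dict1:dict, dict2:dict) -> dict:
--     result_dict = {}
--
--     for key, value in dict1.items():
--         if key in dict2:
--             if value == dict2[key]:
--                 result_dict[key] = "equal"
--             else:
--                 result_dict[key] = "changed"
--         else:
--             result_dict[key] = "deleted"
--
--     for key in dict2:
--         if key not in result_dict:
--             result_dict[key] = "added"
--
--     return result_dict
-- ===== SOURCE B (Python) =====
-- def key_difference(dict1: dict, dict2: dict) -> dict: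
--     # Successive refinement: weakest label first, overwritten by stronger ones.
--     result = dict.fromkeys(dict1, "deleted")
--     result.update((k, "changed") for k in dict1 if k in dict2)
--     result.update((kv[0], "equal") for kv in dict1.items() if kv in dict2.items())
--     result.update((k, "added") for k in dict2 if k not in dict1)
--     return result
-- ===== Notes on version B (the rewrite author's own statement) =====
-- stated objective: alternative
-- what changed: Replaces A's per-key if/else classification (two passes building labels one key at a time) with layered overwrite refinement: all dict1 keys start 'deleted', a second layer overwrites keys present in dict2 to 'changed', a third overwrites keys whose whole (key,value) pair is in dict2.items() to 'equal' (pair membership instead of lookup-and-compare), and a final layer appends 'added' keys; no branching classifies any key.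
import Mathlib
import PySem

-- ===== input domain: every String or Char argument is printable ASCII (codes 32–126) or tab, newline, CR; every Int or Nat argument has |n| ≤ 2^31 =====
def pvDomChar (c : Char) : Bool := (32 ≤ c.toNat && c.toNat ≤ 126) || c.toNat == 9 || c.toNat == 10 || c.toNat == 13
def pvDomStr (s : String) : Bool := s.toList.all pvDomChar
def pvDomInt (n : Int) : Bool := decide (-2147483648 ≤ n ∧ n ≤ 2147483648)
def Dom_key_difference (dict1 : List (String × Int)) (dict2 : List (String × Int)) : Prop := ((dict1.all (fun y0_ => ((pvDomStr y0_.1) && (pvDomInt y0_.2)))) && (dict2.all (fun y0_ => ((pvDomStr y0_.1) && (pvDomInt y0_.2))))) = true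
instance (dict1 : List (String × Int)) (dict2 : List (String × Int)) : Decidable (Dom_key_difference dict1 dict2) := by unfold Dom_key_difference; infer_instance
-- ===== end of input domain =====

-- B replaces A's per-key if/else classification with layered overwrites of a result dict: every dict1 key starts "deleted", is overwritten to "changed" on key membership and to "equal" on (key,value)-pair membership in dict2's items, then new keys are appended "added" (objective: alternative).


-- ===== PORT A =====
def key_difference (dict1 : List (String × Int)) (dict2 : List (String × Int)) : List (String × String) :=
  let d2 := PySem.Dict.mk dict2
  -- first pass: for key, value in dict1.items()
  let r1 := dict1.foldl (fun r kv =>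
      if d2.contains kv.1 then
        if kv.2 == d2.getD kv.1 0 then r.insert kv.1 "equal"
        else r.insert kv.1 "changed"
      else r.insert kv.1 "deleted") PySem.Dict.empty
  -- second pass: for key in dict2
  let r2 := dict2.foldl (fun r kv =>
      if r.contains kv.1 then r else r.insert kv.1 "added") r1
  r2.items

-- ===== PORT B =====
def key_difference_alt (dict1 : List (String × Int)) (dict2 : List (String × Int)) : List (String × String) :=
  let d1 := PySem.Dict.mk dict1
  let d2 := PySem.Dict.mk dict2
  -- result = dict.fromkeys(dict1, "deleted")
  let r0 := (dict1.map Prod.fst).foldl (fun r k => r.insert k "deleted")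
      (PySem.Dict.empty : PySem.Dict String String)
  -- result.update((k, "changed") for k in dict1 if k in dict2)
  let r1 := ((dict1.map Prod.fst).filter (fun k => d2.contains k)).foldl
      (fun r k => r.insert k "changed") r0
  -- result.update((kv[0], "equal") for kv in dict1.items() if kv in dict2.items())
  let r2 := (dict1.filter (fun kv => d2.items.contains kv)).foldl
      (fun r kv => r.insert kv.1 "equal") r1
  -- result.update((k, "added") for k in dict2 if k not in dict1)
  let r3 := ((dict2.map Prod.fst).filter (fun k => !d1.contains k)).foldl
      (fun r k => r.insert k "added") r2
  r3.items

-- ===== PRECONDITION & SPEC =====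
-- Pre_ excludes association lists with duplicate keys: those do not represent any Python dict,
-- so A (whose parameters are dicts) is never run on them and nothing is claimed there.
def Pre_key_difference (dict1 : List (String × Int)) (dict2 : List (String × Int)) : Prop :=
  (dict1.map Prod.fst).Nodup ∧ (dict2.map Prod.fst).Nodup
instance (dict1 : List (String × Int)) (dict2 : List (String × Int)) : Decidable (Pre_key_difference dict1 dict2) := by unfold Pre_key_difference; infer_instance
def pvWitness_key_difference : (List (String × Int)) × (List (String × Int)) :=
  ([("a", 1), ("b", 2)], [("a", 1), ("c", 3)])

def Spec_key_difference (dict1 : List (String × Int)) (dict2 : List (String × Int)) (out : List (String × String)) : Prop := out = key_difference_alt dict1 dict2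
instance (dict1 : List (String × Int)) (dict2 : List (String × Int)) (out : List (String × String)) : Decidable (Spec_key_difference dict1 dict2 out) := by unfold Spec_key_difference; infer_instance

-- ===== CLAIM (what is proved, stated in full; the proofs are below) =====
def Claim_equal_key_difference : Prop := ∀ (dict1 : List (String × Int)) (dict2 : List (String × Int)), Dom_key_difference dict1 dict2 → Pre_key_difference dict1 dict2 → Spec_key_difference dict1 dict2 (key_difference dict1 dict2)

-- ===== LEMMAS AND PROOFS =====

-- A's classification of a dict1 item against dict2
def pvValA (d2 : PySem.Dict String Int) (kv : String × Int) : String :=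
  if d2.contains kv.1 then
    if kv.2 == d2.getD kv.1 0 then "equal" else "changed"
  else "deleted"

-- nodup keys make key equality of members pair equality
theorem pv_key_inj {β : Type} {l : List (String × β)} (h : (l.map Prod.fst).Nodup)
    {a b : String × β} (ha : a ∈ l) (hb : b ∈ l) (he : a.1 = b.1) : a = b := by
  induction l with
  | nil => cases ha
  | cons x t ih =>
    simp only [List.map_cons, List.nodup_cons, List.mem_map] at h
    obtain ⟨hx, ht⟩ := h
    rcases List.mem_cons.mp ha with rfl | ha' <;> rcases List.mem_cons.mp hb with rfl | hb'
    · rfl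
    · exact absurd ⟨b, hb', he.symm⟩ hx
    · exact absurd ⟨a, ha', he⟩ hx
    · exact ih ht ha' hb'

-- characterization of A's first pass
theorem pv_pass1_items (dict1 : List (String × Int)) (d2 : PySem.Dict String Int)
    (h : (dict1.map Prod.fst).Nodup) :
    (dict1.foldl (fun r kv =>
      if d2.contains kv.1 then
        if kv.2 == d2.getD kv.1 0 then r.insert kv.1 "equal"
        else r.insert kv.1 "changed"
      else r.insert kv.1 "deleted") (PySem.Dict.empty : PySem.Dict String String)).items
      = dict1.map (fun kv => (kv.1, pvValA d2 kv)) := by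
  have hf : (fun (r : PySem.Dict String String) (kv : String × Int) =>
      if d2.contains kv.1 then
        if kv.2 == d2.getD kv.1 0 then r.insert kv.1 "equal"
        else r.insert kv.1 "changed"
      else r.insert kv.1 "deleted")
      = fun r kv => r.insert kv.1 (pvValA d2 kv) := by
    funext r kv
    unfold pvValA
    by_cases h1 : d2.contains kv.1 <;> by_cases h2 : kv.2 == d2.getD kv.1 0 <;> simp [h1, h2]
  rw [hf]
  have := PySem.Dict.items_foldl_insert_fresh dict1 Prod.fst (pvValA d2)
      (PySem.Dict.empty : PySem.Dict String String)
      (fun a _ => PySem.Dict.contains_empty _) h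
  simpa using this

-- characterization of A's second pass
theorem pv_pass2_items (l : List (String × Int)) (r : PySem.Dict String String)
    (h : (l.map Prod.fst).Nodup) :
    (l.foldl (fun r kv => if r.contains kv.1 then r else r.insert kv.1 "added") r).items
      = r.items ++ (l.filter (fun kv => !r.contains kv.1)).map (fun kv => (kv.1, "added")) := by
  induction l generalizing r with
  | nil => simp
  | cons kv t ih =>
    simp only [List.map_cons, List.nodup_cons, List.mem_map] at h
    obtain ⟨hk, ht⟩ := h
    by_cases hc : r.contains kv.1
    · simp only [List.foldl_cons, if_pos hc]
      rw [ih r ht, List.filter_cons]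
      simp [hc]
    · simp only [List.foldl_cons, if_neg hc]
      rw [ih (r.insert kv.1 "added") ht,
          PySem.Dict.items_insert_of_not_contains r "added" (by simpa using hc)]
      have hfc : t.filter (fun p => !(r.insert kv.1 "added").contains p.1)
          = t.filter (fun p => !r.contains p.1) := by
        apply List.filter_congr
        intro p hp
        have hne : p.1 ≠ kv.1 := fun e => hk ⟨p, hp, e⟩
        rw [PySem.Dict.contains_insert]
        simp [hne]
      rw [hfc, List.filter_cons]
      simp [hc]

-- one overwrite layer of B: inserting a constant at keys the dict already has rewrites values in place
theorem pv_overwrite {α : Type} (v : String) (key : α → String) (l : List α)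
    (d : PySem.Dict String String) (h : ∀ a ∈ l, d.contains (key a) = true) :
    (l.foldl (fun r a => r.insert (key a) v) d).items
      = d.items.map (fun p => if (l.map key).contains p.1 then (p.1, v) else p) := by
  induction l generalizing d with
  | nil => simp
  | cons a t ih =>
    simp only [List.foldl_cons]
    rw [ih (d.insert (key a) v) (fun b hb => by
        rw [PySem.Dict.contains_insert]
        simp [h b (List.mem_cons_of_mem _ hb)])]
    rw [PySem.Dict.items_insert_of_contains _ _ (h a (List.mem_cons_self ..)), List.map_map]
    apply List.map_congr_left
    intro p hp
    by_cases hk : p.1 = key a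
    · simp [Function.comp, hk]
    · have hb : (p.1 == key a) = false := by simp [hk]
      simp [Function.comp, hb, hk]

theorem key_difference_spec : Claim_equal_key_difference := by
  intro dict1 dict2 _ hpre
  obtain ⟨h1, h2⟩ := hpre
  unfold Spec_key_difference key_difference key_difference_alt
  set d1 := PySem.Dict.mk dict1 with hd1
  set d2 := PySem.Dict.mk dict2 with hd2
  have hmemd1 : ∀ kv : String × Int, kv ∈ dict1 → d1.contains kv.1 = true := by
    intro kv hkv
    rw [hd1, PySem.Dict.contains_mk]
    exact List.any_eq_true.mpr ⟨kv, hkv, by simp⟩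
  -- ---- A's side ----
  set rA := dict1.foldl (fun r kv =>
      if d2.contains kv.1 then
        if kv.2 == d2.getD kv.1 0 then r.insert kv.1 "equal"
        else r.insert kv.1 "changed"
      else r.insert kv.1 "deleted") (PySem.Dict.empty : PySem.Dict String String) with hrA
  have hrAitems : rA.items = dict1.map (fun kv => (kv.1, pvValA d2 kv)) :=
    pv_pass1_items dict1 d2 h1
  have hrAeq : rA = PySem.Dict.mk (dict1.map (fun kv => (kv.1, pvValA d2 kv))) := by
    apply PySem.Dict.ext
    simpa using hrAitems
  have hcontA : ∀ k, rA.contains k = d1.contains k := by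
    intro k
    rw [hrAeq, hd1]
    simp [PySem.Dict.contains_mk, List.any_map, Function.comp_def]
  rw [pv_pass2_items dict2 rA h2, hrAitems]
  -- ---- B's side ----
  set l1 := (dict1.map Prod.fst).filter (fun k => d2.contains k) with hl1
  set l2 := dict1.filter (fun kv => d2.items.contains kv) with hl2
  -- the label each dict1 pair ends with after the three overwrite layers
  set fB := fun kv : String × Int =>
      if (l2.map Prod.fst).contains kv.1 then "equal"
      else if l1.contains kv.1 then "changed" else "deleted" with hfB
  set r0 := (dict1.map Prod.fst).foldl (fun r k => r.insert k "deleted")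
      (PySem.Dict.empty : PySem.Dict String String) with hr0
  have hr0items : r0.items = dict1.map (fun kv => (kv.1, "deleted")) := by
    have := PySem.Dict.items_foldl_insert_fresh (dict1.map Prod.fst) (fun x => x)
        (fun _ => "deleted") (PySem.Dict.empty : PySem.Dict String String)
        (fun a _ => PySem.Dict.contains_empty _) (by simpa using h1)
    simpa [List.map_map] using this
  have hr0eq : r0 = PySem.Dict.mk (dict1.map (fun kv => (kv.1, "deleted"))) := by
    apply PySem.Dict.ext
    simpa using hr0items
  have hcont0 : ∀ k, r0.contains k = d1.contains k := by
    intro k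
    rw [hr0eq, hd1]
    simp [PySem.Dict.contains_mk, List.any_map, Function.comp_def]
  -- layer "changed"
  set r1 := l1.foldl (fun r k => r.insert k "changed") r0 with hr1
  have hr1items : r1.items = dict1.map (fun kv =>
      (kv.1, if l1.contains kv.1 then "changed" else "deleted")) := by
    have := pv_overwrite "changed" (fun x => x) l1 r0 (by
      intro k hk
      rw [hcont0]
      have hk1 : k ∈ dict1.map Prod.fst := List.mem_of_mem_filter hk
      obtain ⟨kv, hkv, rfl⟩ := List.mem_map.mp hk1
      exact hmemd1 kv hkv)
    rw [hr1, this, hr0items, List.map_map]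
    apply List.map_congr_left
    intro kv _
    by_cases hc : kv.1 ∈ l1 <;> simp [Function.comp, hc]
  have hr1eq : r1 = PySem.Dict.mk (dict1.map (fun kv =>
      (kv.1, if l1.contains kv.1 then "changed" else "deleted"))) := by
    apply PySem.Dict.ext
    simpa using hr1items
  have hcont1 : ∀ k, r1.contains k = d1.contains k := by
    intro k
    rw [hr1eq, hd1]
    simp [PySem.Dict.contains_mk, List.any_map, Function.comp_def]
  -- layer "equal"
  set r2 := l2.foldl (fun r kv => r.insert kv.1 "equal") r1 with hr2
  have hr2items : r2.items = dict1.map (fun kv => (kv.1, fB kv)) := by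
    have := pv_overwrite "equal" Prod.fst l2 r1 (by
      intro kv hkv
      rw [hcont1]
      exact hmemd1 kv (List.mem_of_mem_filter hkv))
    rw [hr2, this, hr1items, List.map_map]
    apply List.map_congr_left
    intro kv _
    by_cases hc : kv.1 ∈ l2.map Prod.fst <;> by_cases hc1 : kv.1 ∈ l1 <;>
      simp [Function.comp, hfB, hc, hc1]
  have hr2eq : r2 = PySem.Dict.mk (dict1.map (fun kv => (kv.1, fB kv))) := by
    apply PySem.Dict.ext
    simpa using hr2items
  have hcont2 : ∀ k, r2.contains k = d1.contains k := by
    intro k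
    rw [hr2eq, hd1]
    simp [PySem.Dict.contains_mk, List.any_map, Function.comp_def]
  -- layer "added" appends fresh keys
  set l3 := (dict2.map Prod.fst).filter (fun k => !d1.contains k) with hl3
  have hl3nodup : l3.Nodup := by
    rw [hl3]
    exact (h2.filter _)
  have hl3fresh : ∀ k ∈ l3, r2.contains k = false := by
    intro k hk
    rw [hcont2]
    have := List.of_mem_filter hk
    simpa using this
  have hB := PySem.Dict.items_foldl_insert_fresh l3 (fun x => x) (fun _ => "added")
      r2 hl3fresh (by simpa using hl3nodup)
  rw [hB, hr2items]
  -- ---- the two sides agree segment by segment ----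
  congr 1
  · -- dict1 segment: fB agrees with pvValA on dict1's pairs
    apply List.map_congr_left
    intro kv hkv
    have hd2nd : d2.keys.Nodup := by
      rw [hd2]
      simpa [PySem.Dict.keys] using h2
    have hiff : kv ∈ d2.items ↔ d2.get? kv.1 = some kv.2 :=
      (PySem.Dict.get?_eq_some_iff_mem_items d2 kv.1 kv.2 hd2nd).symm
    have hl2mem : kv.1 ∈ l2.map Prod.fst ↔ kv ∈ d2.items := by
      constructor
      · intro hc
        obtain ⟨kv', hkv', he⟩ := List.mem_map.mp hc
        have hkv'1 : kv' ∈ dict1 := List.mem_of_mem_filter hkv'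
        have heq : kv' = kv := pv_key_inj h1 hkv'1 hkv he
        subst heq
        have := List.of_mem_filter hkv'
        simpa [List.contains_iff_mem] using this
      · intro hmem
        have hmem2 : kv ∈ l2 := by
          rw [hl2]
          exact List.mem_filter.mpr ⟨hkv, by simpa [List.contains_iff_mem] using hmem⟩
        exact List.mem_map.mpr ⟨kv, hmem2, rfl⟩
    have hl1mem : kv.1 ∈ l1 ↔ d2.contains kv.1 = true := by
      constructor
      · intro hc
        simpa using List.of_mem_filter hc
      · intro hc
        rw [hl1]
        exact List.mem_filter.mpr ⟨List.mem_map.mpr ⟨kv, hkv, rfl⟩, by simpa using hc⟩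
    unfold pvValA
    rw [hfB]
    by_cases hc : d2.contains kv.1
    · have hex : ∃ w, d2.get? kv.1 = some w := by
        rw [← Option.isSome_iff_exists, ← PySem.Dict.contains_eq_isSome_get?]
        exact hc
      obtain ⟨w, hw⟩ := hex
      have hgd : d2.getD kv.1 0 = w := PySem.Dict.getD_of_get?_eq_some d2 0 hw
      by_cases hv : kv.2 = w
      · have hmem : kv ∈ d2.items := hiff.mpr (by rw [hw, hv])
        have hc2 : kv.1 ∈ l2.map Prod.fst := hl2mem.mpr hmem
        simp [hc, hc2, hgd, hv]
      · have hc2 : kv.1 ∉ l2.map Prod.fst := by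
          intro hcc
          have h := hiff.mp (hl2mem.mp hcc)
          rw [hw] at h
          exact hv (Option.some_inj.mp h).symm
        have hc1 : kv.1 ∈ l1 := hl1mem.mpr hc
        simp [hc, hc2, hc1, hgd, hv]
    · have hc2 : kv.1 ∉ l2.map Prod.fst := by
        intro hcc
        have h := hiff.mp (hl2mem.mp hcc)
        rw [PySem.Dict.contains_eq_isSome_get?, h] at hc
        simp at hc
      have hc1 : kv.1 ∉ l1 := fun hcc => hc (hl1mem.mp hcc)
      simp [hc, hc2, hc1]
  · -- "added" segment
    have hp : (fun kv : String × Int => !rA.contains kv.1) = (fun kv => !d1.contains kv.1) := by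
      funext kv
      rw [hcontA]
    rw [hp, hl3, List.filter_map, List.map_map]
    rfl
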